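-- pv_equiv track=rewrite | github.com/Lollidood/python-learning | generate_email.py | generate_emails
-- ===== SOURCE A (Python) =====
-- from string import digits
--
-- def generate_emails(existing: list[str], new_users: list[str]) -> list[str]:
--     """Генерирует уникальные email-адреса для новых пользователей.
--     existing — список уже зарегистрированных email
--     new_users — список логинов новых пользователей
--     """
--     logins = {}
--
--     # Обрабатываем уже существующие email
--     for email in existing:
--         login = email.split('@')[0]
--         base = login.rstrip(digits)      # логин без цифр в конце
--         num = login[len(base):]          # цифры в конце (если есть)
--
--         if num:
--             logins.setdefault(base, []).append(int(num))
--         else: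
--             logins.setdefault(base, []).append(0)
--
--     result = []
--
--     # Генерируем email для новых пользователей
--     for login in new_users:
--         if login not in logins:
--             result.append(f"{login}@beegeek.bzz")
--             logins.setdefault(login, []).append(0)
--         else:
--             i = 0
--             while i in logins[login]:
--                 i += 1
--
--             if i == 0:
--                 result.append(f"{login}@beegeek.bzz")
--             else:
--                 result.append(f"{login}{i}@beegeek.bzz")
--
--             logins[login].append(i)
--
--     return result
-- ===== SOURCE B (Python) =====
-- from string import digits
--
-- def generate_emails(existing: list[str], new_users: list[str]) -> list[str]:
--     """Batch algorithm: bucket used suffix numbers per base, count demand per login,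
--     then produce each login's whole block of free numbers by one sorted two-pointer
--     merge (no membership probing), and finally assign the j-th occurrence of a login
--     its j-th free number."""
--     # phase 1: bucket the suffix numbers already taken for each base login
--     used = {}
--     for email in existing:
--         login = email.split('@')[0]
--         base = login.rstrip(digits)
--         num = login[len(base):]
--         used.setdefault(base, set()).add(int(num) if num else 0)
--     # phase 2: how many emails each login will need
--     need = {}
--     for login in new_users:
--         need[login] = need.get(login, 0) + 1
--     # phase 3: per login, its block of free numbers via a sorted two-pointer merge
--     free = {}
--     for login, c in need.items():
--         taken = sorted(used.get(login, ()))
--         block, cand, t = [], 0, 0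
--         while len(block) < c:
--             if t < len(taken) and taken[t] < cand:
--                 t += 1
--             elif t < len(taken) and taken[t] == cand:
--                 t += 1
--                 cand += 1
--             else:
--                 block.append(cand)
--                 cand += 1
--         free[login] = block
--     # phase 4: hand out the blocks in input order
--     pos = {}
--     result = []
--     for login in new_users:
--         j = pos.get(login, 0)
--         pos[login] = j + 1
--         i = free[login][j]
--         result.append(f"{login}{i if i else ''}@beegeek.bzz")
--     return result
-- ===== Notes on version B (the rewrite author's own statement) =====
-- stated objective: faster
-- what changed: B is a staged batch algorithm: it counts how many emails each login needs, computes each login's whole block of free suffix numbers at once by a sorted two-pointer merge (sort the taken numbers, walk candidates and the sorted list together - no membership probing at all), and then assigns the j-th occurrence of a login the j-th number of its block; A instead probes 'while i in list' from 0 against a growing Python list per new user.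
import Mathlib
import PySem

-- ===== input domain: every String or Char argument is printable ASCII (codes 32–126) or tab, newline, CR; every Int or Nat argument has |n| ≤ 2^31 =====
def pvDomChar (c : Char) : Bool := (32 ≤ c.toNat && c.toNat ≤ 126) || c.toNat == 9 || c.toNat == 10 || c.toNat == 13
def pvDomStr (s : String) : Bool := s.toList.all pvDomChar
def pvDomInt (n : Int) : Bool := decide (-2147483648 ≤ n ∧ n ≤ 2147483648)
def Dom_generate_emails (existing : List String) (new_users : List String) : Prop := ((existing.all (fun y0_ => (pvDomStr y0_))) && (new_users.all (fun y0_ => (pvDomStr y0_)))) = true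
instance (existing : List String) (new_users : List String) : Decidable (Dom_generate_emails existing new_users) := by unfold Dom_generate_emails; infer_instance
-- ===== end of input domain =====

-- B is a staged batch algorithm (count demand per login, build each login's whole block of
-- free suffix numbers with one sorted two-pointer merge, then hand the blocks out in input
-- order); measurably faster than A's per-user 'while i in list' probing.

-- ===== PORT A =====
-- email.split('@')[0]; split never returns an empty list
def pvLoginOf (email : String) : List Char := (PySem.Chars.splitOn email.toList ['@']).headD []

-- login.rstrip(digits): digits = '0123456789', and Char.isDigit tests exactly those chars
def pvRstripDigits (cs : List Char) : List Char := (cs.reverse.dropWhile Char.isDigit).reverse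

-- A's 'while i in logins[login]: i += 1' (list membership); fuel is only a totality
-- bound — the Python loop terminates because the list is finite
def pvAFree (l : List Int) : Nat → Int → Int
  | 0, i => i
  | fuel + 1, i => if l.contains i then pvAFree l fuel (i + 1) else i

-- one iteration of A's loop over `existing`
def pvAExist (logins : PySem.Dict String (List Int)) (email : String) : PySem.Dict String (List Int) :=
  let login := pvLoginOf email
  let base := pvRstripDigits login
  let num := login.drop base.length          -- login[len(base):]: exact, 0 ≤ len(base) ≤ len(login)
  let v : Int := if num ≠ [] then (PySem.Int.ofChars? num).getD 0 else 0  -- int(num): num is nonempty digits, never raises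
  -- logins.setdefault(base, []).append(v)
  logins.insert (String.mk base) (logins.getD (String.mk base) [] ++ [v])

-- one iteration of A's loop over `new_users`
def pvAUser (st : PySem.Dict String (List Int) × List String) (login : String) :
    PySem.Dict String (List Int) × List String :=
  let logins := st.1
  let result := st.2
  if logins.contains login = false then
    (logins.insert login [0], result ++ [login ++ "@beegeek.bzz"])
  else
    let l := logins.getD login []
    let i := pvAFree l (l.length + 1) 0   -- while i in logins[login]: i += 1
    let line := if i = 0 then login ++ "@beegeek.bzz" else login ++ PySem.Int.toStr i ++ "@beegeek.bzz"
    (logins.insert login (l ++ [i]), result ++ [line])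

def generate_emails (existing : List String) (new_users : List String) : List String :=
  (new_users.foldl pvAUser (existing.foldl pvAExist PySem.Dict.empty, [])).2

-- ===== PORT B =====
-- phase 1: used.setdefault(base, set()).add(int(num) if num else 0)
def pvBExist (used : PySem.Dict String (PySem.Set Int)) (email : String) : PySem.Dict String (PySem.Set Int) :=
  let login := pvLoginOf email
  let base := pvRstripDigits login
  let num := login.drop base.length
  let v : Int := if num ≠ [] then (PySem.Int.ofChars? num).getD 0 else 0
  used.insert (String.mk base) (PySem.Set.add (used.getD (String.mk base) PySem.Set.empty) v)

-- phase 3's merge loop: 'while len(block) < c: …' with remaining count r = c - len(block);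
-- the two skip branches advance t, the emit branch consumes one unit of r
def pvMerge (taken : List Int) : Nat → Int → Nat → List Int
  | 0, _, _ => []
  | r + 1, cand, t =>
    if h : t < taken.length then
      if taken[t] < cand then pvMerge taken (r + 1) cand (t + 1)
      else if taken[t] = cand then pvMerge taken (r + 1) (cand + 1) (t + 1)
      else cand :: pvMerge taken r (cand + 1) t
    else cand :: pvMerge taken r (cand + 1) t
  termination_by r _ t => (r, taken.length - t)
  decreasing_by all_goals simp_wf <;> omega

-- phase 3: for login, c in need.items(): free[login] = merge block
-- (c = need[login] ≥ 1 is a Python int; the loop bound 'len(block) < c' is ported via c.toNat)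
def pvBlocks (used : PySem.Dict String (PySem.Set Int)) (need : PySem.Dict String Int) :
    PySem.Dict String (List Int) :=
  need.items.foldl
    (fun f kv => f.insert kv.1
      (pvMerge (PySem.List.sorted (used.getD kv.1 PySem.Set.empty) (fun x => x) false) kv.2.toNat 0 0))
    PySem.Dict.empty

-- phase 4: one iteration; free[login][j] is always in range (j counts the occurrences of
-- login seen so far, and block length = total count of login), so List.getD is exact here
def pvBUser (free : PySem.Dict String (List Int))
    (st : PySem.Dict String Int × List String) (login : String) :
    PySem.Dict String Int × List String :=
  let j := st.1.getD login 0
  let i := (free.getD login []).getD j.toNat 0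
  (st.1.insert login (j + 1),
   st.2 ++ [login ++ (if i = 0 then "" else PySem.Int.toStr i) ++ "@beegeek.bzz"])

def generate_emails_alt (existing : List String) (new_users : List String) : List String :=
  let used := existing.foldl pvBExist PySem.Dict.empty
  let need := new_users.foldl (fun d u => d.insert u (d.getD u 0 + 1)) PySem.Dict.empty
  let free := pvBlocks used need
  (new_users.foldl (pvBUser free) (PySem.Dict.empty, [])).2

-- ===== PRECONDITION & SPEC =====
def Spec_generate_emails (existing : List String) (new_users : List String) (out : List String) : Prop := out = generate_emails_alt existing new_users
instance (existing : List String) (new_users : List String) (out : List String) : Decidable (Spec_generate_emails existing new_users out) := by unfold Spec_generate_emails; infer_instance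

-- ===== CLAIM (what is proved, stated in full; the proofs are below) =====
def Claim_equal_generate_emails : Prop := ∀ (existing : List String) (new_users : List String), Dom_generate_emails existing new_users → Spec_generate_emails existing new_users (generate_emails existing new_users)

-- ===== LEMMAS AND PROOFS =====

-- first free number ≥ cand of l (= what A's while loop computes with sufficient fuel)
def mexFrom (l : List Int) (cand : Int) : Int := pvAFree l (l.length + 1) cand

def IsMexFrom (l : List Int) (cand m : Int) : Prop :=
  cand ≤ m ∧ m ∉ l ∧ ∀ j : Int, cand ≤ j → j < m → j ∈ l

theorem isMexFrom_unique {l : List Int} {cand m m' : Int}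
    (h : IsMexFrom l cand m) (h' : IsMexFrom l cand m') : m = m' := by
  obtain ⟨h1, h2, h3⟩ := h
  obtain ⟨h1', h2', h3'⟩ := h'
  by_contra hne
  rcases lt_or_gt_of_ne hne with hlt | hlt
  · exact h2 (h3' m h1 hlt)
  · exact h2' (h3 m' h1' hlt)

-- pigeonhole: if cand, cand+1, …, cand+n-1 all lie in l then n ≤ l.length
theorem window_pigeonhole (l : List Int) (cand : Int) (n : Nat)
    (h : ∀ j : Nat, j < n → cand + (j : Int) ∈ l) : n ≤ l.length := by
  have hsub : ((List.range n).map (fun j : Nat => cand + (j : Int))) ⊆ l := by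
    intro x hx
    simp only [List.mem_map, List.mem_range] at hx
    obtain ⟨j, hj, rfl⟩ := hx
    exact h j hj
  have hnd : ((List.range n).map (fun j : Nat => cand + (j : Int))).Nodup :=
    (List.nodup_range).map (fun a b hab => by omega)
  have := (List.subperm_of_subset hnd hsub).length_le
  simpa using this

theorem exists_mex_from (l : List Int) (cand : Int) :
    ∃ m : Int, cand ≤ m ∧ m ≤ cand + l.length ∧ m ∉ l := by
  by_contra hc
  push_neg at hc
  have := window_pigeonhole l cand (l.length + 1) (fun j hj => by
    have := hc (cand + (j : Int)) (by omega)
    exact this (by push_cast; omega))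
  omega

-- with fuel reaching some non-member, pvAFree computes the least non-member ≥ i
theorem pvAFree_spec (l : List Int) : ∀ (fuel : Nat) (i : Int),
    (∃ m : Int, i ≤ m ∧ m ≤ i + fuel ∧ m ∉ l) →
    IsMexFrom l i (pvAFree l fuel i) := by
  intro fuel
  induction fuel with
  | zero =>
    intro i ⟨m, h1, h2, h3⟩
    have hmi : m = i := by omega
    subst hmi
    simp only [pvAFree]
    exact ⟨le_rfl, h3, fun j hj1 hj2 => by omega⟩
  | succ f ih =>
    intro i ⟨m, h1, h2, h3⟩
    by_cases hi : l.contains i = true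
    · have hmem : i ∈ l := List.contains_iff_mem.mp hi
      have hne : m ≠ i := fun h => h3 (h ▸ hmem)
      obtain ⟨g1, g2, g3⟩ := ih (i + 1) ⟨m, by omega, by omega, h3⟩
      have hstep : pvAFree l (f + 1) i = pvAFree l f (i + 1) := by
        simp only [pvAFree]; rw [if_pos hi]
      rw [hstep]
      refine ⟨by omega, g2, ?_⟩
      intro j hj1 hj2
      by_cases hji : j = i
      · exact hji ▸ hmem
      · exact g3 j (by omega) hj2
    · have hstep : pvAFree l (f + 1) i = i := by
        simp only [pvAFree]; rw [if_neg hi]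
      rw [hstep]
      exact ⟨le_rfl, fun hmem => hi (List.contains_iff_mem.mpr hmem), fun j hj1 hj2 => by omega⟩

theorem isMexFrom_mexFrom (l : List Int) (cand : Int) : IsMexFrom l cand (mexFrom l cand) := by
  obtain ⟨m, h1, h2, h3⟩ := exists_mex_from l cand
  exact pvAFree_spec l (l.length + 1) cand ⟨m, h1, by push_cast at h2 ⊢; omega, h3⟩

theorem mexFrom_eq {l : List Int} {cand m : Int} (h : IsMexFrom l cand m) :
    mexFrom l cand = m := isMexFrom_unique (isMexFrom_mexFrom l cand) h

theorem mexFrom_congr {l l' : List Int} (h : ∀ x : Int, x ∈ l ↔ x ∈ l') (cand : Int) :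
    mexFrom l cand = mexFrom l' cand := by
  apply mexFrom_eq
  obtain ⟨h1, h2, h3⟩ := isMexFrom_mexFrom l' cand
  exact ⟨h1, fun hm => h2 ((h _).mp hm), fun j hj1 hj2 => (h j).mpr (h3 j hj1 hj2)⟩

-- the first r free numbers ≥ cand of l, in increasing order
def freeSeq (l : List Int) : Nat → Int → List Int
  | 0, _ => []
  | r + 1, cand => mexFrom l cand :: freeSeq l r (mexFrom l cand + 1)

theorem freeSeq_length (l : List Int) : ∀ (r : Nat) (cand : Int), (freeSeq l r cand).length = r := by
  intro r
  induction r with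
  | zero => intro cand; rfl
  | succ r ih => intro cand; simp [freeSeq, ih]

theorem freeSeq_congr {l l' : List Int} (h : ∀ x : Int, x ∈ l ↔ x ∈ l') :
    ∀ (r : Nat) (cand : Int), freeSeq l r cand = freeSeq l' r cand := by
  intro r
  induction r with
  | zero => intro cand; rfl
  | succ r ih =>
    intro cand
    simp only [freeSeq, mexFrom_congr h cand, ih]

theorem freeSeq_mem_shift {l : List Int} {cand : Int} (h : cand ∈ l) (r : Nat) :
    freeSeq l r cand = freeSeq l r (cand + 1) := by
  cases r with
  | zero => rfl
  | succ r =>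
    have hm : mexFrom l cand = mexFrom l (cand + 1) := by
      apply mexFrom_eq
      obtain ⟨h1, h2, h3⟩ := isMexFrom_mexFrom l (cand + 1)
      refine ⟨by omega, h2, ?_⟩
      intro j hj1 hj2
      by_cases hj : j = cand
      · exact hj ▸ h
      · exact h3 j (by omega) hj2
    simp only [freeSeq, hm]

theorem freeSeq_not_mem_cons {l : List Int} {cand : Int} (h : cand ∉ l) (r : Nat) :
    freeSeq l (r + 1) cand = cand :: freeSeq l r (cand + 1) := by
  have hm : mexFrom l cand = cand := mexFrom_eq ⟨le_rfl, h, fun j hj1 hj2 => by omega⟩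
  simp only [freeSeq, hm]

-- B's sorted two-pointer merge produces exactly the free-number sequence
theorem pvMerge_eq_freeSeq (taken : List Int) (hst : taken.Pairwise (· < ·)) :
    ∀ (r : Nat) (cand : Int) (t : Nat),
    (∀ x ∈ taken.take t, x < cand) → pvMerge taken r cand t = freeSeq taken r cand := by
  intro r cand t
  induction r, cand, t using pvMerge.induct taken with
  | case1 cand t => intro _; rw [pvMerge]; rfl
  | case2 r cand t h hlt ih =>
    intro hinv
    rw [pvMerge, dif_pos h, if_pos hlt]
    apply ih
    intro x hx
    rw [List.take_succ, List.getElem?_eq_getElem h] at hx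
    simp only [Option.toList_some, List.mem_append, List.mem_singleton] at hx
    rcases hx with hx | hx
    · exact hinv x hx
    · omega
  | case3 r t h hlt ih =>
    intro hinv
    rw [pvMerge, dif_pos h, if_neg hlt, if_pos rfl]
    rw [ih (by
      intro x hx
      rw [List.take_succ, List.getElem?_eq_getElem h] at hx
      simp only [Option.toList_some, List.mem_append, List.mem_singleton] at hx
      rcases hx with hx | hx
      · have := hinv x hx; omega
      · omega)]
    exact (freeSeq_mem_shift (List.getElem_mem h) (r + 1)).symm
  | case4 r cand t h hlt hne ih =>
    intro hinv
    have hnot : cand ∉ taken := by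
      intro hmem
      obtain ⟨u, hu, hval⟩ := List.mem_iff_getElem.mp hmem
      rcases lt_trichotomy u t with huc | huc | huc
      · have hx : taken[u] ∈ taken.take t := by
          rw [List.mem_take_iff_getElem]
          exact ⟨u, by omega, rfl⟩
        have := hinv _ hx
        omega
      · subst huc
        exact hne hval
      · have := List.pairwise_iff_getElem.mp hst t u h hu huc
        omega
    rw [pvMerge, dif_pos h, if_neg hlt, if_neg hne, freeSeq_not_mem_cons hnot]
    congr 1
    apply ih
    intro x hx
    have := hinv x hx
    omega
  | case5 r cand t h ih =>
    intro hinv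
    have hnot : cand ∉ taken := by
      intro hmem
      have htk : taken.take t = taken := List.take_of_length_le (by omega)
      have := hinv cand (by rw [htk]; exact hmem)
      omega
    rw [pvMerge, dif_neg h, freeSeq_not_mem_cons hnot]
    congr 1
    apply ih
    intro x hx
    have := hinv x hx
    omega

-- every prefix element of a free sequence is the least number free for l together
-- with the elements before it
theorem freeSeq_isMex (l : List Int) : ∀ (r : Nat) (cand : Int) (j : Nat), j < r →
    cand ≤ (freeSeq l r cand).getD j 0 ∧
    (freeSeq l r cand).getD j 0 ∉ l ∧
    (∀ x : Int, cand ≤ x → x < (freeSeq l r cand).getD j 0 →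
        x ∈ l ∨ x ∈ (freeSeq l r cand).take j) ∧
    (freeSeq l r cand).getD j 0 ∉ (freeSeq l r cand).take j := by
  intro r
  induction r with
  | zero => intro cand j hj; omega
  | succ r ih =>
    intro cand j hj
    obtain ⟨h1, h2, h3⟩ := isMexFrom_mexFrom l cand
    cases j with
    | zero =>
      refine ⟨h1, h2, ?_, by simp⟩
      intro x hx1 hx2
      simp only [freeSeq, List.getD_cons_zero] at hx2
      exact Or.inl (h3 x hx1 hx2)
    | succ j =>
      obtain ⟨g1, g2, g3, g4⟩ := ih (mexFrom l cand + 1) j (by omega)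
      simp only [freeSeq, List.getD_cons_succ, List.take_succ_cons]
      refine ⟨by omega, g2, ?_, ?_⟩
      · intro x hx1 hx2
        rcases lt_trichotomy x (mexFrom l cand) with hc | hc | hc
        · exact Or.inl (h3 x hx1 hc)
        · exact Or.inr (by simp [hc])
        · rcases g3 x (by omega) hx2 with hg | hg
          · exact Or.inl hg
          · exact Or.inr (List.mem_cons_of_mem _ hg)
      · intro hmem
        rcases List.mem_cons.mp hmem with hc | hc
        · omega
        · exact g4 hc

-- relation between A's dict of lists and B's dict of sets after phase 1
def InvUsed (d : PySem.Dict String (List Int)) (e : PySem.Dict String (PySem.Set Int)) : Prop :=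
  ∀ k : String, (∀ x : Int, x ∈ d.getD k [] ↔ x ∈ e.getD k PySem.Set.empty) ∧
    (e.getD k PySem.Set.empty).Nodup

theorem invUsed_step (d : PySem.Dict String (List Int)) (e : PySem.Dict String (PySem.Set Int))
    (email : String) (h : InvUsed d e) : InvUsed (pvAExist d email) (pvBExist e email) := by
  intro k
  obtain ⟨hmem, hnd⟩ := h k
  simp only [pvAExist, pvBExist]
  set key := String.mk (pvRstripDigits (pvLoginOf email))
  by_cases hk : k = key
  · subst hk
    rw [PySem.Dict.getD_insert_self, PySem.Dict.getD_insert_self]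
    refine ⟨?_, PySem.Set.nodup_add _ _ hnd⟩
    intro x
    rw [PySem.Set.mem_add]
    simp only [List.mem_append, List.mem_singleton]
    exact or_congr (hmem x) Iff.rfl
  · rw [PySem.Dict.getD_insert_of_ne _ _ _ hk, PySem.Dict.getD_insert_of_ne _ _ _ hk]
    exact ⟨hmem, hnd⟩

theorem phase1 (existing : List String) :
    InvUsed (existing.foldl pvAExist PySem.Dict.empty) (existing.foldl pvBExist PySem.Dict.empty) := by
  have base : InvUsed PySem.Dict.empty PySem.Dict.empty := by
    intro k
    refine ⟨?_, ?_⟩ <;> simp [PySem.Dict.getD_empty, PySem.Set.empty]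
  have gen : ∀ (es : List String) d e, InvUsed d e →
      InvUsed (es.foldl pvAExist d) (es.foldl pvBExist e) := by
    intro es
    induction es with
    | nil => intro d e h; exact h
    | cons email es ih => intro d e h; exact ih _ _ (invUsed_step d e email h)
  exact gen existing _ _ base

-- A's per-user step, written uniformly: both branches append the mex and emit its line
theorem pvAUser_eq (d : PySem.Dict String (List Int)) (acc : List String) (login : String) :
    pvAUser (d, acc) login =
      (d.insert login (d.getD login [] ++ [mexFrom (d.getD login []) 0]),
       acc ++ [if mexFrom (d.getD login []) 0 = 0 then login ++ "@beegeek.bzz"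
               else login ++ PySem.Int.toStr (mexFrom (d.getD login []) 0) ++ "@beegeek.bzz"]) := by
  by_cases hc : d.contains login = false
  · have hget : d.getD login [] = ([] : List Int) := PySem.Dict.getD_of_not_contains d [] hc
    have hm : mexFrom ([] : List Int) 0 = 0 := by simp [mexFrom, pvAFree]
    rw [hget, hm]
    simp [pvAUser, hc, hget]
  · have hc' : d.contains login = true := by revert hc; cases d.contains login <;> simp
    simp only [pvAUser, hc', Bool.true_eq_false, if_false]
    rfl

-- take (j+1) of a list with its j-th element spelt getD
theorem take_succ_getD {l : List Int} {j : Nat} (h : j < l.length) :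
    l.take (j + 1) = l.take j ++ [l.getD j 0] := by
  rw [List.take_succ, List.getElem?_eq_getElem h, List.getD_eq_getElem l 0 h]
  rfl

-- phase 4: A's stateful probing fold and B's block-indexing fold produce the same lines
theorem phase4 (free : PySem.Dict String (List Int)) (F : String → List Int)
    (l0 : String → List Int) :
    ∀ (us : List String) (d : PySem.Dict String (List Int)) (pos : PySem.Dict String Int)
      (acc : List String),
    (∀ k, k ∈ us → free.getD k [] = F k) →
    (∀ k, k ∈ us → ∃ r : Nat, F k = freeSeq (l0 k) r 0) →
    (∀ k, k ∈ us → 0 ≤ pos.getD k 0 ∧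
        (pos.getD k 0).toNat + us.count k ≤ (F k).length ∧
        ∀ x : Int, x ∈ d.getD k [] ↔ x ∈ l0 k ∨ x ∈ (F k).take (pos.getD k 0).toNat) →
    (us.foldl pvAUser (d, acc)).2 = (us.foldl (pvBUser free) (pos, acc)).2 := by
  intro us
  induction us with
  | nil => intro d pos acc _ _ _; rfl
  | cons login rest ih =>
    intro d pos acc hfree hF hinv
    have hmemlogin : login ∈ login :: rest := List.mem_cons_self
    obtain ⟨hj0, hcnt, hmem⟩ := hinv login hmemlogin
    obtain ⟨r, hFr⟩ := hF login hmemlogin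
    have hlenF : (F login).length = r := by rw [hFr]; exact freeSeq_length _ r 0
    have hcount1 : (login :: rest).count login = rest.count login + 1 := by simp
    set j : Int := pos.getD login 0 with hjdef
    set jn : Nat := j.toNat with hjn
    have hjr : jn < r := by omega
    set i : Int := (F login).getD jn 0 with hidef
    obtain ⟨m1, m2, m3, m4⟩ := by
      have := freeSeq_isMex (l0 login) r 0 jn hjr
      rw [← hFr] at this
      exact this
    -- A's computed mex equals B's block element i
    have hmex : mexFrom (d.getD login []) 0 = i := by
      apply mexFrom_eq
      refine ⟨m1, ?_, ?_⟩
      · intro hin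
        rcases (hmem i).mp hin with hc | hc
        · exact m2 hc
        · exact m4 hc
      · intro x hx1 hx2
        rcases m3 x hx1 hx2 with hc | hc
        · exact (hmem x).mpr (Or.inl hc)
        · exact (hmem x).mpr (Or.inr hc)
    -- both steps emit the same line
    have hline : (if i = 0 then login ++ "@beegeek.bzz"
          else login ++ PySem.Int.toStr i ++ "@beegeek.bzz") =
        login ++ (if i = 0 then "" else PySem.Int.toStr i) ++ "@beegeek.bzz" := by
      by_cases h0 : i = 0 <;> simp [h0, String.append_empty]
    simp only [List.foldl_cons]
    rw [pvAUser_eq, hmex, hline]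
    have hBstep : pvBUser free (pos, acc) login =
        (pos.insert login (j + 1),
         acc ++ [login ++ (if i = 0 then "" else PySem.Int.toStr i) ++ "@beegeek.bzz"]) := by
      simp only [pvBUser, ← hjdef, hfree login hmemlogin, ← hidef, ← hjn]
    rw [hBstep]
    apply ih
    · intro k hk; exact hfree k (List.mem_cons_of_mem _ hk)
    · intro k hk; exact hF k (List.mem_cons_of_mem _ hk)
    · intro k hk
      obtain ⟨g0, gcnt, gmem⟩ := hinv k (List.mem_cons_of_mem _ hk)
      by_cases hkl : k = login
      · subst hkl
        rw [PySem.Dict.getD_insert_self]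
        have hjn1 : (j + 1).toNat = jn + 1 := by omega
        refine ⟨by omega, ?_, ?_⟩
        · rw [hjn1]
          have hcc : (k :: rest).count k = rest.count k + 1 := by simp
          omega
        · intro x
          rw [PySem.Dict.getD_insert_self, hjn1,
            take_succ_getD (by omega : jn < (F k).length)]
          simp only [List.mem_append, List.mem_singleton]
          rw [gmem x]
          tauto
      · rw [PySem.Dict.getD_insert_of_ne _ _ _ hkl, PySem.Dict.getD_insert_of_ne _ _ _ hkl]
        refine ⟨g0, ?_, gmem⟩
        have hcc : (login :: rest).count k = rest.count k := by
          simp [List.count_cons, Ne.symm hkl]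
        omega

-- the block dict computed in B's phase 3: for every login occurring in new_users it
-- stores exactly the free-number sequence of A's phase-1 list for that login
theorem pvBlocks_getD (existing new_users : List String) (login : String)
    (hlogin : login ∈ new_users) :
    (pvBlocks (existing.foldl pvBExist PySem.Dict.empty) (PySem.Dict.counter new_users)).getD login []
      = freeSeq ((existing.foldl pvAExist PySem.Dict.empty).getD login [])
          (new_users.count login) 0 := by
  set used := existing.foldl pvBExist PySem.Dict.empty
  set d0 := existing.foldl pvAExist PySem.Dict.empty
  set blk : String × Int → List Int := fun kv =>
    pvMerge (PySem.List.sorted (used.getD kv.1 PySem.Set.empty) (fun x => x) false) kv.2.toNat 0 0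
  have hkeysnd : ((PySem.Dict.counter new_users).items.map Prod.fst).Nodup :=
    PySem.Dict.nodup_keys_counter new_users
  have hitems : (pvBlocks used (PySem.Dict.counter new_users)).items =
      (PySem.Dict.counter new_users).items.map (fun kv => (kv.1, blk kv)) := by
    have := PySem.Dict.items_foldl_insert_fresh (PySem.Dict.counter new_users).items
      Prod.fst blk PySem.Dict.empty (fun a _ => rfl) hkeysnd
    simpa [pvBlocks, blk] using this
  have hkeys2 : (pvBlocks used (PySem.Dict.counter new_users)).keys.Nodup := by
    have : (pvBlocks used (PySem.Dict.counter new_users)).keys =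
        (PySem.Dict.counter new_users).items.map Prod.fst := by
      show (pvBlocks used (PySem.Dict.counter new_users)).items.map Prod.fst = _
      rw [hitems, List.map_map]
      rfl
    rw [this]; exact hkeysnd
  have hmemit : (login, (new_users.count login : Int)) ∈ (PySem.Dict.counter new_users).items := by
    rw [PySem.Dict.items_counter]
    exact List.mem_map.mpr ⟨login, (PySem.Set.mem_ofList new_users login).mpr hlogin, rfl⟩
  have hmemit2 : (login, blk (login, (new_users.count login : Int))) ∈
      (pvBlocks used (PySem.Dict.counter new_users)).items := by
    rw [hitems]
    exact List.mem_map.mpr ⟨_, hmemit, rfl⟩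
  rw [PySem.Dict.getD_of_mem_items _ hmemit2 hkeys2]
  -- now reduce the merge block to the free sequence
  obtain ⟨hmemiff, hnd⟩ := phase1 existing login
  set s := used.getD login PySem.Set.empty
  set taken := PySem.List.sorted s (fun x : Int => x) false
  have hperm : taken.Perm s := PySem.List.sorted_perm s _ false
  have hpair : taken.Pairwise (· < ·) := by
    have hle : taken.Pairwise (· ≤ ·) := PySem.List.sorted_pairwise s (fun x : Int => x)
    have hndt : taken.Nodup := (hperm.nodup_iff).mpr hnd
    exact (hle.and hndt).imp (fun hab => lt_of_le_of_ne hab.1 hab.2)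
  have hmerge : blk (login, (new_users.count login : Int)) =
      freeSeq taken (new_users.count login) 0 := by
    show pvMerge taken ((new_users.count login : Int)).toNat 0 0 = _
    rw [Int.toNat_natCast]
    exact pvMerge_eq_freeSeq taken hpair _ 0 0 (by simp)
  rw [hmerge]
  apply freeSeq_congr
  intro x
  rw [hperm.mem_iff]
  exact (hmemiff x).symm

-- ===== VERDICT (by name: the statement is the Claim_ definition above) =====
theorem generate_emails_spec : Claim_equal_generate_emails := by
  intro existing new_users _
  unfold Spec_generate_emails generate_emails generate_emails_alt
  rw [PySem.Dict.foldl_insert_getD_add_one_eq_counter]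
  apply phase4 _ (fun k => freeSeq ((existing.foldl pvAExist PySem.Dict.empty).getD k [])
      (new_users.count k) 0) (fun k => (existing.foldl pvAExist PySem.Dict.empty).getD k [])
  · intro k hk
    exact pvBlocks_getD existing new_users k hk
  · intro k _
    exact ⟨new_users.count k, rfl⟩
  · intro k _
    rw [PySem.Dict.getD_empty]
    refine ⟨le_rfl, ?_, ?_⟩
    · rw [freeSeq_length]; simp
    · intro x; simp
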